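-- pv_equiv track=rewrite | github.com/vargaskenneth27/Final_Exam | kmers.py | count_kmers
-- ===== SOURCE A (Python) =====
-- def count_kmers(text, k):
--     """
--     Counts the number of unique substrings of length k
--     that appear as substrings of the given string text
--
--     :param k: Substring length as an integer
--     :param text: Given sequence as a string
--     :returns the number of unique substrings of length k
--     :raises ValueError: if input is invalid
--     """
--     # Error : null or empty text
--     if not text:
--         raise ValueError()
--
--     # Error : invalid k
--     if len(text) < k or k <= 0:
--         raise ValueError()
--
--     # Create an empty set
--     kmers = set()
--
--     # Count the number of unique substrings of length k
--     for i in range(0, len(text) - k + 1):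
--         kmers.add(text[i : i + k])
--
--     # Return length as the result
--     return len(kmers)
-- ===== SOURCE B (Python) =====
-- def count_kmers(text, k):
--     """Sort the k-mers once, then count boundaries between adjacent distinct
--     entries instead of maintaining a hash set."""
--     if not text:
--         raise ValueError()
--     if len(text) < k or k <= 0:
--         raise ValueError()
--     subs = sorted(text[i : i + k] for i in range(len(text) - k + 1))
--     return 1 + sum(x != y for x, y in zip(subs, subs[1:]))
-- ===== Notes on version B (the rewrite author's own statement) =====
-- stated objective: alternative
-- what changed: Replaces the hash-set accumulation with a sort-then-scan: collect all k-mers, sort them, and count adjacent boundaries where consecutive sorted k-mers differ.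
import Mathlib
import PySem

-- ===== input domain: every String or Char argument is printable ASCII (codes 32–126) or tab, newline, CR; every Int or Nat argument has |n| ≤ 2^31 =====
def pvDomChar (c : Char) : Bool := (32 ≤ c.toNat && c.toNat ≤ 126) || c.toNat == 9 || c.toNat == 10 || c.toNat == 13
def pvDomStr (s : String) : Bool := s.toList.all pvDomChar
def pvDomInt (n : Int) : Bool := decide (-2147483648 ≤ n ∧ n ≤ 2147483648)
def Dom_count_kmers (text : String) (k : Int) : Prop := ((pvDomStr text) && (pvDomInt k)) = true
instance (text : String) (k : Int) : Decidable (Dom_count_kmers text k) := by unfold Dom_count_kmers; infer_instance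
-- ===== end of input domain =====

-- B replaces A's hash-set accumulation by sort-then-scan over the k-mers (alternative algorithm, same cost class).


-- ===== PORT A =====
-- A raises ValueError on empty text and on invalid k; those inputs are excluded by Pre_ below,
-- so the port transcribes only the returning path: a set built by a fold over range(0, len(text)-k+1).
def count_kmers (text : String) (k : Int) : Int :=
  let kmers : PySem.Set String :=
    (PySem.List.pyRange 0 (PySem.Str.len text - k + 1) 1).foldl
      (fun s i => PySem.Set.add s (PySem.Str.slice text (some i) (some (i + k))))
      PySem.Set.empty
  PySem.Set.len kmers

-- ===== PORT B =====
def count_kmers_alt (text : String) (k : Int) : Int :=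
  let subs : List String :=
    PySem.List.sorted
      ((PySem.List.pyRange 0 (PySem.Str.len text - k + 1) 1).map
        (fun i => PySem.Str.slice text (some i) (some (i + k))))
      (fun x => x) false
  1 + ((subs.zip (PySem.List.slice subs (some 1) none)).map
        (fun p => if p.1 ≠ p.2 then (1 : Int) else 0)).sum

-- ===== PRECONDITION & SPEC =====
-- Pre_ excludes exactly the inputs on which A raises ValueError: empty text, k ≤ 0, or k > len(text).
def Pre_count_kmers (text : String) (k : Int) : Prop :=
  text ≠ "" ∧ 0 < k ∧ k ≤ PySem.Str.len text
instance (text : String) (k : Int) : Decidable (Pre_count_kmers text k) := by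
  unfold Pre_count_kmers; infer_instance
def pvWitness_count_kmers : String × Int := ("banana", 2)

def Spec_count_kmers (text : String) (k : Int) (out : Int) : Prop := out = count_kmers_alt text k
instance (text : String) (k : Int) (out : Int) : Decidable (Spec_count_kmers text k out) := by unfold Spec_count_kmers; infer_instance

-- ===== CLAIM (what is proved, stated in full; the proofs are below) =====
def Claim_equal_count_kmers : Prop := ∀ (text : String) (k : Int), Dom_count_kmers text k → Pre_count_kmers text k → Spec_count_kmers text k (count_kmers text k)

-- ===== LEMMAS AND PROOFS =====

-- On a ≤-sorted nonempty list, 1 + the number of adjacent boundaries is the number of distinct elements.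
theorem pv_boundary_count {α : Type} [DecidableEq α] [LinearOrder α] :
    ∀ (s : List α), s ≠ [] → List.Pairwise (· ≤ ·) s →
      1 + ((s.zip (s.drop 1)).map (fun p => if p.1 ≠ p.2 then (1 : Int) else 0)).sum
        = (s.toFinset.card : Int) := by
  intro s
  induction s with
  | nil => intro h; exact absurd rfl h
  | cons a t ih =>
    intro _ hp
    match t, ih with
    | [], _ => simp
    | b :: u, ih =>
      have hp' : List.Pairwise (· ≤ ·) (b :: u) := hp.tail
      have hab : a ≤ b := (List.pairwise_cons.mp hp).1 b (by simp)
      have hih := ih (by simp) hp'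
      by_cases hEq : a = b
      · subst hEq
        have hfe : ((a :: a :: u).toFinset.card : Int) = ((a :: u).toFinset.card : Int) := by
          simp
        simp only [List.drop_succ_cons, List.drop_zero, List.zip_cons_cons, List.map_cons,
          List.sum_cons] at hih ⊢
        rw [if_neg (fun h => h rfl)]
        omega
      · have hnotmem : a ∉ (b :: u) := by
          intro hmem
          rcases List.mem_cons.mp hmem with h | h
          · exact hEq h
          · have hba : b ≤ a := (List.pairwise_cons.mp hp').1 a h
            exact hEq (le_antisymm hab hba)
        have hcard : ((a :: b :: u).toFinset.card : Int)
            = ((b :: u).toFinset.card : Int) + 1 := by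
          have : (a :: b :: u).toFinset = insert a (b :: u).toFinset := by simp
          rw [this, Finset.card_insert_of_notMem (by simpa using hnotmem)]
          push_cast; ring
        simp only [List.drop_succ_cons, List.drop_zero, List.zip_cons_cons, List.map_cons,
          List.sum_cons, if_pos hEq] at *
        omega

theorem pv_perm_toFinset {α : Type} [DecidableEq α] {l₁ l₂ : List α} (h : l₁.Perm l₂) :
    l₁.toFinset = l₂.toFinset := by
  ext x; simp [h.mem_iff]

theorem pv_ofList_card {α : Type} [DecidableEq α] [BEq α] [LawfulBEq α] (l : List α) :
    ((PySem.Set.ofList l).length : Int) = (l.toFinset.card : Int) := by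
  have hnd := PySem.Set.nodup_ofList l
  have hmemeq : (PySem.Set.ofList l).toFinset = l.toFinset := by
    ext x; simp [PySem.Set.mem_ofList]
  rw [← List.toFinset_card_of_nodup hnd, hmemeq]

-- ===== VERDICT (by name: the statement is the Claim_ definition above) =====
theorem count_kmers_spec : Claim_equal_count_kmers := by
  intro text k _ hpre
  obtain ⟨hne, hk0, hkn⟩ := hpre
  unfold Spec_count_kmers count_kmers count_kmers_alt
  set L : List String :=
    (PySem.List.pyRange 0 (PySem.Str.len text - k + 1) 1).map
      (fun i => PySem.Str.slice text (some i) (some (i + k))) with hL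
  have hA : (PySem.List.pyRange 0 (PySem.Str.len text - k + 1) 1).foldl
      (fun s i => PySem.Set.add s (PySem.Str.slice text (some i) (some (i + k))))
      PySem.Set.empty = PySem.Set.ofList L := by
    rw [PySem.Set.ofList_eq_foldl, hL, List.foldl_map]
    rfl
  have hLne : L ≠ [] := by
    intro h
    have hlen := congrArg List.length h
    simp [hL, PySem.List.length_pyRange_one, PySem.Str.len_eq] at hlen
    simp [PySem.Str.len_eq] at hkn
    omega
  set s : List String := PySem.List.sorted L (fun x => x) false with hs
  have hperm : s.Perm L := PySem.List.sorted_perm L _ _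
  have hsne : s ≠ [] := by
    rw [hs]; intro h; exact hLne ((PySem.List.sorted_eq_nil_iff L _ _).mp h)
  have hsp : List.Pairwise (· ≤ ·) s := PySem.List.sorted_pairwise L (fun x => x)
  have hslice : PySem.List.slice s (some 1) none = s.drop 1 := by
    exact PySem.List.slice_from s (by omega)
  have hB := pv_boundary_count s hsne hsp
  simp only [PySem.Set.len, hA, hslice, hB, pv_ofList_card, pv_perm_toFinset hperm]
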